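-- pv_equiv track=rewrite | github.com/janfiszer/fl-varying-normalization | src/utils/files_operations.py | filter_filepaths
-- ===== SOURCE A (Python) =====
-- from typing import Tuple, Optional, Dict, List, Set
--
-- def filter_filepaths(modalities_filepaths: Dict[str, List[str]] = None, filtered_patients: List[str] = None):
--     """
--     Filters out the filepaths based on the patients names. If the filepath contains any of
--     the provided patients names (substring) it is left, otherwise it's filtered out.
--     :param modalities_filepaths: In the form that `get_patients_filepaths()` returns
--     :param filtered_patients: Filter and also in the form that `get_patients_filepaths()` returns
--     :return: Filtered filepaths.
--     """
--     filtered_filepaths_dict = {}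
--
--     for modality, filepaths in modalities_filepaths.items():
--         filtered_filepaths = []
--
--         for filepath in filepaths:
--             # Check if any substring is in the current string
--             if any(patient_name in filepath for patient_name in filtered_patients):
--                 filtered_filepaths.append(filepath)
--
--         filtered_filepaths_dict[modality] = filtered_filepaths
--
--     return filtered_filepaths_dict
-- ===== SOURCE B (Python) =====
-- def filter_filepaths(modalities_filepaths=None, filtered_patients=None):
--     result = {}
--     for modality, filepaths in modalities_filepaths.items():
--         flags = [(fp, False) for fp in filepaths]
--         for patient_name in filtered_patients:
--             flags = [(fp, k or (patient_name in fp)) for fp, k in flags]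
--         result[modality] = [fp for fp, k in flags if k]
--     return result
-- ===== Notes on version B (the rewrite author's own statement) =====
-- stated objective: alternative
-- what changed: B transposes the matching loops: instead of scanning all patient names per filepath with any(), it sweeps each patient name once over a list of (filepath, flag) pairs, marking matches, and finally projects the flagged filepaths.
import Mathlib
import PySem

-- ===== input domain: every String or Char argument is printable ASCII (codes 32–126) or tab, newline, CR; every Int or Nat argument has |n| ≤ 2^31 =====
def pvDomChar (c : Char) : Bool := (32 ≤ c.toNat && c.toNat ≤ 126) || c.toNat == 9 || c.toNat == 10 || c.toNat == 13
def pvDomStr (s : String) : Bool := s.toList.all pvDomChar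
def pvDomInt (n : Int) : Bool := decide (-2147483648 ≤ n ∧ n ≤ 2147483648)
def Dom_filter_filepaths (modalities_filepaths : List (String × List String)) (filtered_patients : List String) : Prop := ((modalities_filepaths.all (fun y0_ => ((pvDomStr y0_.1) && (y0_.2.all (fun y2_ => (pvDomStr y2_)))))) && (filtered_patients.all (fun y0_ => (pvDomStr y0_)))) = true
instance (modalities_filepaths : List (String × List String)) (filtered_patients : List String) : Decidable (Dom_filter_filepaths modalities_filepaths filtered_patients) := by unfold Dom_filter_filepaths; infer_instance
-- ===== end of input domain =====

-- B transposes the matching loops: per modality it sweeps each patient name once over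
-- (filepath, flag) pairs, marking matches, then projects the flagged filepaths (alternative
-- decomposition, same asymptotic cost).


-- ===== PORT A =====
-- literal port of A: for each dict item, append each filepath matched by any patient name
def filter_filepaths (modalities_filepaths : List (String × List String)) (filtered_patients : List String) : List (String × List String) :=
  ((PySem.Dict.ofList modalities_filepaths).items.foldl
    (fun (d : PySem.Dict String (List String)) x =>
      d.insert x.1
        (x.2.foldl
          (fun acc filepath =>
            if filtered_patients.any (fun patient_name => PySem.Str.isIn patient_name filepath)
            then acc ++ [filepath] else acc)
          []))
    PySem.Dict.empty).items

-- ===== PORT B =====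
-- literal port of B: (filepath, flag) pairs, one sweep per patient name, then project flagged
def filter_filepaths_alt (modalities_filepaths : List (String × List String)) (filtered_patients : List String) : List (String × List String) :=
  ((PySem.Dict.ofList modalities_filepaths).items.foldl
    (fun (d : PySem.Dict String (List String)) x =>
      let flags :=
        filtered_patients.foldl
          (fun fl patient_name =>
            fl.map (fun q => (q.1, q.2 || PySem.Str.isIn patient_name q.1)))
          (x.2.map (fun fp => (fp, false)))
      d.insert x.1 (flags.filterMap (fun q => if q.2 then some q.1 else none)))
    PySem.Dict.empty).items

-- ===== PRECONDITION & SPEC =====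
def Spec_filter_filepaths (modalities_filepaths : List (String × List String)) (filtered_patients : List String) (out : List (String × List String)) : Prop := out = filter_filepaths_alt modalities_filepaths filtered_patients
instance (modalities_filepaths : List (String × List String)) (filtered_patients : List String) (out : List (String × List String)) : Decidable (Spec_filter_filepaths modalities_filepaths filtered_patients out) := by unfold Spec_filter_filepaths; infer_instance

-- ===== CLAIM (what is proved, stated in full; the proofs are below) =====
def Claim_equal_filter_filepaths : Prop := ∀ (modalities_filepaths : List (String × List String)) (filtered_patients : List String), Dom_filter_filepaths modalities_filepaths filtered_patients → Spec_filter_filepaths modalities_filepaths filtered_patients (filter_filepaths modalities_filepaths filtered_patients)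

-- ===== LEMMAS AND PROOFS =====

-- B's flag-sweep fold, started from flags g, marks exactly the filepaths matched by some patient
theorem flags_fold_eq (pats : List String) (fps : List String) (g : String → Bool) :
    pats.foldl
      (fun fl patient_name =>
        fl.map (fun q => (q.1, q.2 || PySem.Str.isIn patient_name q.1)))
      (fps.map (fun fp => (fp, g fp)))
    = fps.map (fun fp => (fp, g fp || pats.any (fun p => PySem.Str.isIn p fp))) := by
  induction pats generalizing g with
  | nil => simp
  | cons p ps ih =>
    simp only [List.foldl_cons, List.map_map]
    have h1 : ((fun q : String × Bool => (q.1, q.2 || PySem.Str.isIn p q.1)) ∘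
        (fun fp => (fp, g fp))) = fun fp => (fp, g fp || PySem.Str.isIn p fp) := by
      funext fp; rfl
    rw [h1, ih (fun fp => g fp || PySem.Str.isIn p fp)]
    simp [Bool.or_assoc]

-- projecting the flagged pairs is filtering by the flag predicate
theorem filterMap_flags (fps : List String) (b : String → Bool) :
    (fps.map (fun fp => (fp, b fp))).filterMap (fun q => if q.2 then some q.1 else none)
    = fps.filter b := by
  induction fps with
  | nil => rfl
  | cons fp rest ih =>
    by_cases h : b fp <;> simp [h, ih]

-- the two inner computations agree per modality
theorem inner_eq (pats : List String) (fps : List String) :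
    (fps.foldl
      (fun acc filepath =>
        if pats.any (fun patient_name => PySem.Str.isIn patient_name filepath)
        then acc ++ [filepath] else acc)
      [])
    = (pats.foldl
        (fun fl patient_name =>
          fl.map (fun q => (q.1, q.2 || PySem.Str.isIn patient_name q.1)))
        (fps.map (fun fp => (fp, false)))).filterMap
        (fun q => if q.2 then some q.1 else none) := by
  rw [PySem.List.foldl_append_if_eq_filter]
  rw [flags_fold_eq pats fps (fun _ => false)]
  simp only [Bool.false_or]
  rw [filterMap_flags]
  simp

-- ===== VERDICT (by name: the statement is the Claim_ definition above) =====
theorem filter_filepaths_spec : Claim_equal_filter_filepaths := by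
  intro mfp pats _
  unfold Spec_filter_filepaths filter_filepaths filter_filepaths_alt
  congr 1
  apply List.foldl_ext
  intro d x _
  simp only []
  congr 1
  exact inner_eq pats x.2
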